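-- pv_equiv track=rewrite | github.com/IanAguiar-ai/Cycle-Based_Compressor | codes/python/cycle_based_compressor.py | symbol_table
-- ===== SOURCE A (Python) =====
-- def bitpattern(m:int, j:int) -> str:
--     """
--     bitparttern = 0^m 1^j where m >= 1 and j >= 1
--     """
--     return "0"*m + "1"*j
--
-- def symbol_table(frequenci_table:list[tuple]) -> dict:
--     symb_tab:dict = {}
--     j, max_ = 1, 2
--     for key, _ in frequenci_table:
--         symb_tab[key] = bitpattern(m = max_-j, j = j)
--         j += 1
--         if j >= max_:
--             j, max_ = 1, max_ + 1
--     return symb_tab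
-- ===== SOURCE B (Python) =====
-- def _isqrt(n):
--     # floor integer square root by Newton's method (exact, integer-only)
--     if n == 0:
--         return 0
--     x = n
--     y = (x + 1) // 2
--     while y < x:
--         x = y
--         y = (x + n // x) // 2
--     return x
--
-- def symbol_table(frequenci_table):
--     symb_tab = {}
--     for i, (key, _) in enumerate(frequenci_table):
--         n = (_isqrt(8 * i + 1) - 1) // 2          # block number: largest n with n*(n+1)//2 <= i
--         j = i - n * (n + 1) // 2 + 1              # position inside the block, 1-based
--         symb_tab[key] = "0" * (n + 2 - j) + "1" * j
--     return symb_tab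
-- ===== Notes on version B (the rewrite author's own statement) =====
-- stated objective: alternative
-- what changed: Replaces A's incremental j/max_ counter state machine (with its reset branch) by a per-index closed form: each key's code is derived positionally from the integer triangular root of its enumerate index, computed with a Newton integer square root.
import Mathlib
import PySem

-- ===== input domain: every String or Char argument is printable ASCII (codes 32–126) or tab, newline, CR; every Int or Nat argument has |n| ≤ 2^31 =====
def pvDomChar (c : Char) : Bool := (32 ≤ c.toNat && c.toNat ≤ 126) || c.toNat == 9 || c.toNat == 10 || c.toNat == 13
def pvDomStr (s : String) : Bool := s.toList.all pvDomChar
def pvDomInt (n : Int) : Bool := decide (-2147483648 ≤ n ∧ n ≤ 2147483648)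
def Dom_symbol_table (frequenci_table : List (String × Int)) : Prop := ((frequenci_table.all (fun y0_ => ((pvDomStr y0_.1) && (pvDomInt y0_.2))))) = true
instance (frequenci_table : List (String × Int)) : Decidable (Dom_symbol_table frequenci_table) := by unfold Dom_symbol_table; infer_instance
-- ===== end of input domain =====

-- B replaces A's incremental j/max_ state machine (with its reset branch) by a per-index
-- closed form: the code of the i-th key is derived positionally from the integer triangular
-- root of i (Newton integer sqrt).  Objective: alternative decomposition, same cost.

-- ===== PORT A =====
-- "0"*m + "1"*j, ported over List Char ('0'*m with m : Int → pyRepeat, empty for m ≤ 0, as in Python)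
def bitpattern (m j : Int) : String :=
  String.ofList (PySem.List.pyRepeat ['0'] m ++ PySem.List.pyRepeat ['1'] j)

-- the for-loop of A: state (symb_tab, j, max_)
def symbolLoopA : List (String × Int) → PySem.Dict String String → Int → Int → PySem.Dict String String
  | [], d, _, _ => d
  | (key, _) :: rest, d, j, max_ =>
      let d' := d.insert key (bitpattern (max_ - j) j)
      let j' := j + 1
      if j' ≥ max_ then symbolLoopA rest d' 1 (max_ + 1)
      else symbolLoopA rest d' j' max_

def symbol_table (frequenci_table : List (String × Int)) : List (String × String) :=
  (symbolLoopA frequenci_table PySem.Dict.empty 1 2).items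

-- ===== PORT B =====
-- Newton's integer square root from Source B (all quantities are natural numbers here:
-- the argument 8*i+1 ≥ 1 and every loop value is ≥ 0, so the Nat port is exact).
def pyIsqrtLoop (n x y : Nat) : Nat :=
  if y < x then pyIsqrtLoop n y ((y + n / y) / 2) else x
termination_by x

def pyIsqrt (n : Nat) : Nat :=
  if n = 0 then 0 else pyIsqrtLoop n n ((n + 1) / 2)

-- loop body of Source B; the enumerate index i ≥ 0 and (provably) n*(n+1)//2 ≤ i and j ≤ n+2,
-- so the Nat arithmetic below computes exactly Python's int arithmetic.
def stepB (d : PySem.Dict String String) (p : Int × String × Int) : PySem.Dict String String :=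
  let i : Nat := p.1.toNat
  let n : Nat := (pyIsqrt (8 * i + 1) - 1) / 2
  let j : Nat := i - n * (n + 1) / 2 + 1
  d.insert p.2.1 (String.ofList (List.replicate (n + 2 - j) '0' ++ List.replicate j '1'))

def symbol_table_alt (frequenci_table : List (String × Int)) : List (String × String) :=
  ((PySem.List.enumerate frequenci_table).foldl stepB PySem.Dict.empty).items

-- ===== PRECONDITION & SPEC =====
def Spec_symbol_table (frequenci_table : List (String × Int)) (out : List (String × String)) : Prop := out = symbol_table_alt frequenci_table
instance (frequenci_table : List (String × Int)) (out : List (String × String)) : Decidable (Spec_symbol_table frequenci_table out) := by unfold Spec_symbol_table; infer_instance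

-- ===== CLAIM (what is proved, stated in full; the proofs are below) =====
def Claim_equal_symbol_table : Prop := ∀ (frequenci_table : List (String × Int)), Dom_symbol_table frequenci_table → Spec_symbol_table frequenci_table (symbol_table frequenci_table)

-- ===== LEMMAS AND PROOFS =====

-- AM-GM step of Newton's iteration: the next iterate never drops below √n
lemma sqrt_le_newton_step (n x : Nat) (hx : 1 ≤ x) : Nat.sqrt n ≤ (x + n / x) / 2 := by
  have hsq : Nat.sqrt n * Nat.sqrt n ≤ n := Nat.sqrt_le n
  have hdm : x * (n / x) + n % x = n := Nat.div_add_mod n x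
  have hr : n % x < x := Nat.mod_lt _ hx
  have key : 2 * Nat.sqrt n ≤ x + n / x := by
    by_contra hlt
    set s := Nat.sqrt n with hs
    set q := n / x with hq
    have h1 : x + q + 1 ≤ 2 * s := by omega
    have h2 : n + 1 ≤ x * q + x := by omega
    zify at h1 h2 hsq
    nlinarith [sq_nonneg ((x : Int) - (q : Int) - 1)]
  omega

-- the Newton loop computes the floor square root
lemma pyIsqrtLoop_eq (n : Nat) (hn : 1 ≤ n) :
    ∀ x y, Nat.sqrt n ≤ x → y = (x + n / x) / 2 → pyIsqrtLoop n x y = Nat.sqrt n := by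
  intro x
  induction x using Nat.strong_induction_on with
  | _ x ih =>
    intro y hsx hy
    rw [pyIsqrtLoop]
    split
    · have hx1 : 1 ≤ x := by omega
      have hy1 : Nat.sqrt n ≤ y := hy ▸ sqrt_le_newton_step n x hx1
      exact ih y (by omega) _ hy1 rfl
    · rename_i h
      have hs1 : 1 ≤ Nat.sqrt n := Nat.le_sqrt.mpr (by omega)
      have hx1 : 1 ≤ x := le_trans hs1 hsx
      have hx2 : x ≤ n / x := by omega
      have hxx : x * x ≤ n := (Nat.le_div_iff_mul_le hx1).mp hx2
      have := Nat.le_sqrt.mpr hxx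
      omega

lemma pyIsqrt_eq (n : Nat) : pyIsqrt n = Nat.sqrt n := by
  unfold pyIsqrt
  split
  · simp [*]
  · rename_i hn
    have hn1 : 1 ≤ n := by omega
    have hd : n / n = 1 := Nat.div_self hn1
    exact pyIsqrtLoop_eq n hn1 n ((n + 1) / 2) (Nat.sqrt_le_self n) (by rw [hd])

-- triangular-root bracket: the index n*(n+1)/2 + k with k ≤ n lies in block n
lemma sqrt_block (n k : Nat) (hk : k ≤ n) :
    (pyIsqrt (8 * (n * (n + 1) / 2 + k) + 1) - 1) / 2 = n := by
  rw [pyIsqrt_eq]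
  have h4 : 8 * (n * (n + 1) / 2 + k) + 1 = 4 * (n * (n + 1)) + 8 * k + 1 := by
    have := Nat.two_mul_div_two_of_even (Nat.even_mul_succ_self n)
    omega
  rw [h4]
  have hlo : 2 * n + 1 ≤ Nat.sqrt (4 * (n * (n + 1)) + 8 * k + 1) := by
    rw [Nat.le_sqrt]; nlinarith
  have hhi : Nat.sqrt (4 * (n * (n + 1)) + 8 * k + 1) < 2 * n + 3 := by
    rw [Nat.sqrt_lt]; nlinarith
  omega

-- one step: B's closed form at index n*(n+1)/2 + (j-1) produces exactly A's bitpattern for state (j, n+2)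
lemma stepB_eq (d : PySem.Dict String String) (key : String) (v : Int) (n j : Nat)
    (hj1 : 1 ≤ j) (hj2 : j ≤ n + 1) :
    stepB d (((n * (n + 1) / 2 + (j - 1) : Nat) : Int), key, v) =
      d.insert key (bitpattern ((n : Int) + 2 - j) j) := by
  unfold stepB bitpattern
  simp only [Int.toNat_natCast]
  rw [sqrt_block n (j - 1) (by omega)]
  have hJ : n * (n + 1) / 2 + (j - 1) - n * (n + 1) / 2 + 1 = j := by omega
  rw [hJ]
  rw [PySem.List.pyRepeat_singleton, PySem.List.pyRepeat_singleton]
  have h0 : ((n : Int) + 2 - (j : Int)).toNat = n + 2 - j := by omega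
  have h1 : ((j : Int)).toNat = j := by omega
  rw [h0, h1]

-- main loop correspondence: A's state (j, max_ = n+2) sits at enumerate index n*(n+1)/2 + (j-1)
lemma loopAB (l : List (String × Int)) :
    ∀ (d : PySem.Dict String String) (n j : Nat), 1 ≤ j → j ≤ n + 1 →
      symbolLoopA l d (j : Int) ((n : Int) + 2) =
      (PySem.List.enumerate l ((n * (n + 1) / 2 + (j - 1) : Nat) : Int)).foldl stepB d := by
  induction l with
  | nil => intro d n j _ _; simp [symbolLoopA, PySem.List.enumerate_nil]
  | cons p rest ih =>
    intro d n j hj1 hj2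
    obtain ⟨key, v⟩ := p
    rw [PySem.List.enumerate_cons, List.foldl_cons, stepB_eq d key v n j hj1 hj2]
    show (if (j : Int) + 1 ≥ (n : Int) + 2 then
            symbolLoopA rest (d.insert key (bitpattern ((n : Int) + 2 - (j : Int)) (j : Int))) 1 ((n : Int) + 2 + 1)
          else symbolLoopA rest (d.insert key (bitpattern ((n : Int) + 2 - (j : Int)) (j : Int))) ((j : Int) + 1) ((n : Int) + 2)) = _
    by_cases hcase : j = n + 1
    · subst hcase
      rw [if_pos (by omega)]
      have e1 : ((n : Int) + 2 + 1) = ((n + 1 : Nat) : Int) + 2 := by push_cast; ring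
      have e2 : (1 : Int) = ((1 : Nat) : Int) := rfl
      rw [e1, e2, ih _ (n + 1) 1 (by omega) (by omega)]
      congr 1
      have e3 : (n + 1) * (n + 1 + 1) = n * (n + 1) + 2 * (n + 1) := by ring
      have e4 := Nat.two_mul_div_two_of_even (Nat.even_mul_succ_self n)
      have e5 := Nat.two_mul_div_two_of_even (Nat.even_mul_succ_self (n + 1))
      have : (n + 1) * ((n + 1) + 1) / 2 + (1 - 1) = n * (n + 1) / 2 + (n + 1 - 1) + 1 := by
        omega
      rw [this]
      push_cast
      ring_nf
    · rw [if_neg (by omega)]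
      have e2 : ((j : Int) + 1) = ((j + 1 : Nat) : Int) := by push_cast; ring
      rw [e2, ih _ n (j + 1) (by omega) (by omega)]
      congr 1
      have : n * (n + 1) / 2 + (j + 1 - 1) = n * (n + 1) / 2 + (j - 1) + 1 := by omega
      rw [this]
      push_cast
      ring_nf

-- ===== VERDICT (by name: the statement is the Claim_ definition above) =====
theorem symbol_table_spec : Claim_equal_symbol_table := by
  intro ft _
  unfold Spec_symbol_table symbol_table symbol_table_alt
  have h := loopAB ft PySem.Dict.empty 0 1 (by omega) (by omega)
  simp only [Nat.zero_add, Nat.mul_one, Nat.zero_div] at h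
  exact congrArg PySem.Dict.items (by simpa using h)
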